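-- pv_equiv track=rewrite | github.com/John-David-Terry/PolarisHEP | ingest_inspire.py | pick_keywords
-- ===== SOURCE A (Python) =====
-- from typing import Any, Dict, Iterable
--
-- def pick_keywords(md: Dict[str, Any]) -> list[str]:
--     # INSPIRE schema commonly uses: metadata.keywords = [{"value": "..."}]
--     kws = md.get("keywords") or []
--     out: list[str] = []
--     if isinstance(kws, list):
--         for k in kws:
--             if isinstance(k, dict):
--                 v = (k.get("value") or "").strip()
--                 if v:
--                     out.append(v)
--             elif isinstance(k, str) and k.strip():
--                 out.append(k.strip())
--     # de-dupe while preserving order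
--     seen = set()
--     deduped = []
--     for v in out:
--         if v not in seen:
--             seen.add(v)
--             deduped.append(v)
--     return deduped
-- ===== SOURCE B (Python) =====
-- def pick_keywords(md):
--     # Different algorithm: normalize via a comprehension (map + filter), then
--     # deduplicate WITHOUT a seen-set: repeatedly emit the first value and
--     # filter every later copy of it out of the remaining list.
--     kws = md.get("keywords") or []
--     if not isinstance(kws, list):
--         kws = []
--     vals = [v for v in (_norm(k) for k in kws) if v]
--     res = []
--     while vals:
--         head = vals[0]
--         res.append(head)
--         vals = [v for v in vals[1:] if v != head]
--     return res
--
-- def _norm(k):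
--     if isinstance(k, dict):
--         return (k.get("value") or "").strip()
--     if isinstance(k, str):
--         return k.strip()
--     return ""
-- ===== Notes on version B (the rewrite author's own statement) =====
-- stated objective: alternative
-- what changed: Replaces A's two-pass collect-then-seen-set-dedupe with a map+filter normalization followed by a set-free dedupe that repeatedly emits the first remaining value and filters all of its later duplicates out of the tail.
import Mathlib
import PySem

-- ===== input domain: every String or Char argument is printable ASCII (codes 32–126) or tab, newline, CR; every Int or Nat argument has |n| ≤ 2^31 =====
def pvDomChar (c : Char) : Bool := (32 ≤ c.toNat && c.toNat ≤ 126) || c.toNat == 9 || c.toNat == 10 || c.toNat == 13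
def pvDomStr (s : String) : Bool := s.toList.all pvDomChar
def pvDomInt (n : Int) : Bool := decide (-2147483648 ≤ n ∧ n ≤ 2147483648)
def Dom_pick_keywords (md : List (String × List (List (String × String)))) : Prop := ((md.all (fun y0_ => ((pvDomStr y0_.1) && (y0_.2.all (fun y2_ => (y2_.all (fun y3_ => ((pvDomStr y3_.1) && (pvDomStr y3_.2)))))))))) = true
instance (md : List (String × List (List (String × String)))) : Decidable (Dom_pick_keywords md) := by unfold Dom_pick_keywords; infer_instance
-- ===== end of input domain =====

-- B extracts stripped values by map+filter and deduplicates without a seen-set, by repeatedly filtering the head's duplicates out of the tail; objective: alternative.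


-- ===== PORT A =====
-- md.get("keywords") or [] : a missing key and an empty list both give []
-- k.get("value") or ""     : a missing key gives "" (an empty value is already "")
-- under the type convention every element of kws is a dict, so only the dict branch is reachable
def pick_keywords (md : List (String × List (List (String × String)))) : List String :=
  let kws := ((PySem.Dict.mk md).get? "keywords").getD []
  let out := kws.foldl (fun out k =>
    let v := PySem.Str.strip (((PySem.Dict.mk k).get? "value").getD "")
    if v ≠ "" then out ++ [v] else out) []
  (out.foldl (fun (st : PySem.Set String × List String) v =>
    if v ∉ st.1 then (PySem.Set.add st.1 v, st.2 ++ [v]) else st)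
    ((PySem.Set.empty : PySem.Set String), [])).2

-- ===== PORT B =====
-- B's _norm helper (only the dict branch is reachable under the type convention)
def pvNorm (k : List (String × String)) : String :=
  PySem.Str.strip (((PySem.Dict.mk k).get? "value").getD "")

-- B's while loop: emit the head, drop its duplicates from the rest, recurse
def pvDedupe : List String → List String
  | [] => []
  | v :: rest => v :: pvDedupe (rest.filter (fun x => x ≠ v))
termination_by vals => vals.length
decreasing_by
  simp only [List.length_unattach]
  exact Nat.lt_succ_of_le (le_trans (List.length_filter_le _ _) (le_of_eq List.length_attach))

def pick_keywords_alt (md : List (String × List (List (String × String)))) : List String :=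
  let kws := ((PySem.Dict.mk md).get? "keywords").getD []
  let vals := (kws.map pvNorm).filter (fun v => v ≠ "")
  pvDedupe vals

-- ===== PRECONDITION & SPEC =====
def Spec_pick_keywords (md : List (String × List (List (String × String)))) (out : List String) : Prop := out = pick_keywords_alt md
instance (md : List (String × List (List (String × String)))) (out : List String) : Decidable (Spec_pick_keywords md out) := by unfold Spec_pick_keywords; infer_instance

-- ===== CLAIM (what is proved, stated in full; the proofs are below) =====
def Claim_equal_pick_keywords : Prop := ∀ (md : List (String × List (List (String × String)))), Dom_pick_keywords md → Spec_pick_keywords md (pick_keywords md)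

-- ===== LEMMAS AND PROOFS =====

-- unfolding lemma for B's while loop
lemma pvDedupe_cons (v : String) (rest : List String) :
    pvDedupe (v :: rest) = v :: pvDedupe (rest.filter (fun x => x ≠ v)) := by
  rw [pvDedupe.eq_def]

-- A's collecting loop is map-then-filter.
lemma pv_extract_eq (f : List (String × String) → String) (kws : List (List (String × String))) :
    kws.foldl (fun out k => if f k ≠ "" then out ++ [f k] else out) []
    = (kws.map f).filter (fun v => v ≠ "") := by
  suffices h : ∀ acc, kws.foldl (fun out k => if f k ≠ "" then out ++ [f k] else out) acc
      = acc ++ (kws.map f).filter (fun v => v ≠ "") by simpa using h []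
  induction kws with
  | nil => intro acc; simp
  | cons k kws ih =>
    intro acc
    by_cases h : f k ≠ ""
    · simp only [List.foldl_cons, if_pos h, List.map_cons, List.filter_cons, decide_eq_true h]
      rw [ih]; simp
    · simp only [ne_eq, not_not] at h
      simp only [List.foldl_cons, List.map_cons, List.filter_cons, h]
      simpa [h] using ih acc

-- A's seen-set dedupe loop from state (s, acc) produces acc ++ B's filter-dedupe of the not-yet-seen values.
lemma pv_dedupe_eq :
    ∀ (vals : List String) (s : PySem.Set String) (acc : List String),
      (vals.foldl (fun (st : PySem.Set String × List String) v =>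
        if v ∉ st.1 then (PySem.Set.add st.1 v, st.2 ++ [v]) else st) (s, acc)).2
      = acc ++ pvDedupe (vals.filter (fun x => x ∉ s)) := by
  intro vals
  induction vals with
  | nil => intro s acc; simp [pvDedupe.eq_def]
  | cons v rest ih =>
    intro s acc
    rw [List.foldl_cons]
    by_cases hm : v ∈ s
    · rw [if_neg (by simpa using hm)]
      rw [ih]
      congr 2
      simp [hm]
    · rw [if_pos (by simpa using hm)]
      rw [ih]
      have hc : List.filter (fun x => decide (x ∉ s)) (v :: rest)
          = v :: List.filter (fun x => decide (x ∉ s)) rest := by simp [hm]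
      rw [hc, pvDedupe_cons]
      have hfil : List.filter (fun x => x ≠ v) (List.filter (fun x => decide (x ∉ s)) rest)
          = List.filter (fun x => decide (x ∉ PySem.Set.add s v)) rest := by
        rw [List.filter_filter]
        apply List.filter_congr
        intro x _
        simp only [PySem.Set.mem_add, decide_not]
        by_cases h1 : x ∈ s <;> by_cases h2 : x = v <;> simp [h1, h2]
      rw [hfil]
      simp

-- ===== VERDICT (by name: the statement is the Claim_ definition above) =====
theorem pick_keywords_spec : Claim_equal_pick_keywords := by
  intro md _
  unfold Spec_pick_keywords
  simp only [pick_keywords, pick_keywords_alt]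
  rw [pv_extract_eq, pv_dedupe_eq]
  simp only [List.nil_append]
  have hfe : ∀ L : List String,
      List.filter (fun x => decide (x ∉ (PySem.Set.empty : PySem.Set String))) L = L := by
    intro L; simp [PySem.Set.empty]
  rw [hfe]
  rfl
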